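-- pv_equiv track=rewrite | github.com/BodanampatiMohith/Classical-Safety-Sentinel | core/decision.py | _count_violations
-- ===== SOURCE A (Python) =====
-- from typing import Dict, Tuple
--
-- def _count_violations(violations: Dict[str, bool]) -> Tuple[int, int]:
--     """Count violations"""
--     critical_rules = [
--         'critical_veh_ped_distance',
--         'critical_veh_veh_distance',
--         'very_high_speed',
--         'high_closing_speed',
--         'low_ttc'
--     ]
--
--     warning_rules = [
--         'warning_veh_ped_distance',
--         'warning_veh_veh_distance',
--         'high_speed',
--         'mixed_traffic_close',
--         'warning_ttc',
--         'moderate_closing_speed'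
--     ]
--
--     critical_count = sum(1 for rule in critical_rules if violations.get(rule, False))
--     warning_count = sum(1 for rule in warning_rules if violations.get(rule, False))
--
--     return critical_count, warning_count
-- ===== SOURCE B (Python) =====
-- def _count_violations(violations):
--     """Count violations"""
--     critical = {
--         'critical_veh_ped_distance',
--         'critical_veh_veh_distance',
--         'very_high_speed',
--         'high_closing_speed',
--         'low_ttc',
--     }
--     warning = {
--         'warning_veh_ped_distance',
--         'warning_veh_veh_distance',
--         'high_speed',
--         'mixed_traffic_close',
--         'warning_ttc',
--         'moderate_closing_speed',
--     }
--     critical_count = 0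
--     warning_count = 0
--     for rule, flag in violations.items():
--         if flag:
--             if rule in critical:
--                 critical_count += 1
--             elif rule in warning:
--                 warning_count += 1
--     return critical_count, warning_count
-- ===== Notes on version B (the rewrite author's own statement) =====
-- stated objective: alternative
-- what changed: B makes a single pass over the dict's items, classifying each truthy entry against two rule-name sets, instead of probing the dict once per each of the 11 fixed rule names with two generator sums.
import Mathlib
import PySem

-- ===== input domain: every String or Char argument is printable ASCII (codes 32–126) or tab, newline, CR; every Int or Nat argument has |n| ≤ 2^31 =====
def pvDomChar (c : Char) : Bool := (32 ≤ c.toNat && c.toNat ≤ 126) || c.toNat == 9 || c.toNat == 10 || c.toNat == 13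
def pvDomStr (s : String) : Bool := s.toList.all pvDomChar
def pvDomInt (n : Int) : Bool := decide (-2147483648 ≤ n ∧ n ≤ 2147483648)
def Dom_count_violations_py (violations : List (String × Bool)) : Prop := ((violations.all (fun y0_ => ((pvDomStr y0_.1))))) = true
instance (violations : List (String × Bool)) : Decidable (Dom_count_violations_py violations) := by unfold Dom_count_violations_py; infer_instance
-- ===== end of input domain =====

-- B replaces A's two fixed-rule-list generator sums (one dict probe per rule name) by a
-- single pass over the dict's items, classifying each truthy entry against two rule-name sets.


-- ===== PORT A =====
def count_violations_py (violations : List (String × Bool)) : Int × Int :=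
  let critical_rules : List String :=
    ["critical_veh_ped_distance", "critical_veh_veh_distance", "very_high_speed",
     "high_closing_speed", "low_ttc"]
  let warning_rules : List String :=
    ["warning_veh_ped_distance", "warning_veh_veh_distance", "high_speed",
     "mixed_traffic_close", "warning_ttc", "moderate_closing_speed"]
  -- sum(1 for rule in … if violations.get(rule, False))
  let critical_count : Int := critical_rules.foldl
    (fun acc rule => if (PySem.Dict.mk violations).getD rule false then acc + 1 else acc) 0
  let warning_count : Int := warning_rules.foldl
    (fun acc rule => if (PySem.Dict.mk violations).getD rule false then acc + 1 else acc) 0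
  (critical_count, warning_count)

-- ===== PORT B =====
def count_violations_py_alt (violations : List (String × Bool)) : Int × Int :=
  let critical : PySem.Set String := PySem.Set.ofList
    ["critical_veh_ped_distance", "critical_veh_veh_distance", "very_high_speed",
     "high_closing_speed", "low_ttc"]
  let warning : PySem.Set String := PySem.Set.ofList
    ["warning_veh_ped_distance", "warning_veh_veh_distance", "high_speed",
     "mixed_traffic_close", "warning_ttc", "moderate_closing_speed"]
  violations.foldl
    (fun (acc : Int × Int) kv =>
      if kv.2 then
        if kv.1 ∈ critical then (acc.1 + 1, acc.2)
        else if kv.1 ∈ warning then (acc.1, acc.2 + 1)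
        else acc
      else acc)
    (0, 0)

-- ===== PRECONDITION & SPEC =====
-- Pre_ requires pairwise-distinct keys: a Python dict can never carry duplicate keys, so this
-- excludes no input the Python A accepts; it only rules out association lists denoting no dict.
def Pre_count_violations_py (violations : List (String × Bool)) : Prop :=
  (violations.map Prod.fst).Nodup
instance (violations : List (String × Bool)) : Decidable (Pre_count_violations_py violations) := by unfold Pre_count_violations_py; infer_instance

def pvWitness_count_violations_py : (List (String × Bool)) :=
  [("low_ttc", true), ("high_speed", true), ("other", false)]

def Spec_count_violations_py (violations : List (String × Bool)) (out : Int × Int) : Prop := out = count_violations_py_alt violations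
instance (violations : List (String × Bool)) (out : Int × Int) : Decidable (Spec_count_violations_py violations out) := by unfold Spec_count_violations_py; infer_instance

-- ===== CLAIM (what is proved, stated in full; the proofs are below) =====
def Claim_equal_count_violations_py : Prop := ∀ (violations : List (String × Bool)), Dom_count_violations_py violations → Pre_count_violations_py violations → Spec_count_violations_py violations (count_violations_py violations)

-- ===== LEMMAS AND PROOFS =====

def pvCritL : List String :=
  ["critical_veh_ped_distance", "critical_veh_veh_distance", "very_high_speed",
   "high_closing_speed", "low_ttc"]
def pvWarnL : List String :=
  ["warning_veh_ped_distance", "warning_veh_veh_distance", "high_speed",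
   "mixed_traffic_close", "warning_ttc", "moderate_closing_speed"]

-- A's counting fold over a rule list is a countP.
theorem pv_foldlA (p : String → Bool) (l : List String) (a : Int) :
    l.foldl (fun acc r => if p r then acc + 1 else acc) a = a + (l.countP p : Int) := by
  induction l generalizing a with
  | nil => simp
  | cons x t ih =>
    simp only [List.foldl_cons, List.countP_cons, ih]
    by_cases h : p x <;> simp [h] <;> push_cast <;> ring

-- the two rule sets are disjoint
theorem pv_disjoint (k : String) (hk : k ∈ pvWarnL) : k ∉ pvCritL := by
  fin_cases hk <;> decide

-- B's fold is a pair of countP's.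
theorem pv_foldlB (vs : List (String × Bool)) (a : Int × Int) :
    vs.foldl
      (fun (acc : Int × Int) kv =>
        if kv.2 then
          if kv.1 ∈ pvCritL then (acc.1 + 1, acc.2)
          else if kv.1 ∈ pvWarnL then (acc.1, acc.2 + 1)
          else acc
        else acc) a
    = (a.1 + (vs.countP (fun kv => kv.2 && decide (kv.1 ∈ pvCritL)) : Int),
       a.2 + (vs.countP (fun kv => kv.2 && decide (kv.1 ∈ pvWarnL)) : Int)) := by
  induction vs generalizing a with
  | nil => simp
  | cons kv t ih =>
    simp only [List.foldl_cons, List.countP_cons, ih]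
    by_cases hv : kv.2
    · by_cases hc : kv.1 ∈ pvCritL
      · have hw : kv.1 ∉ pvWarnL := fun h => pv_disjoint _ h hc
        simp [hv, hc, hw] <;> omega
      · by_cases hw : kv.1 ∈ pvWarnL
        · simp [hv, hc, hw] <;> omega
        · simp [hv, hc, hw]
    · simp [hv]

-- updating a predicate at one fresh key shifts countP over a Nodup list by the membership indicator
theorem pv_countP_update (k : String) (v : Bool) (p : String → Bool) (hpk : p k = false)
    (l : List String) (hnd : l.Nodup) :
    l.countP (fun r => if k == r then v else p r)
      = l.countP p + (if v && decide (k ∈ l) then 1 else 0) := by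
  induction l with
  | nil => simp
  | cons a t ih =>
    have hnd' := hnd
    rw [List.nodup_cons] at hnd'
    obtain ⟨hat, ht⟩ := hnd'
    by_cases hak : a = k
    · subst hak
      have htcong : t.countP (fun r => if a == r then v else p r) = t.countP p := by
        apply List.countP_congr
        intro r hr
        have hne : a ≠ r := fun h => hat (h ▸ hr)
        simp [beq_eq_false_iff_ne.mpr hne]
      simp only [List.countP_cons, htcong, BEq.rfl, if_true, hpk]
      by_cases hv : v <;> simp [hv]
    · have hka : (k == a) = false := beq_eq_false_iff_ne.mpr (fun h => hak h.symm)
      have hka' : k ≠ a := fun h => hak h.symm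
      simp only [List.countP_cons, ih ht, hka, if_false]
      by_cases hkt : k ∈ t <;> simp [List.mem_cons, hkt, hka', hpk] <;> omega

-- the heart: on a dup-free association list, probing each rule equals scanning the entries
theorem pv_main (rules : List String) (hr : rules.Nodup) (vs : List (String × Bool))
    (hnd : (vs.map Prod.fst).Nodup) :
    rules.countP (fun r => (PySem.Dict.mk vs).getD r false)
      = vs.countP (fun kv => kv.2 && decide (kv.1 ∈ rules)) := by
  induction vs with
  | nil =>
    simp [PySem.Dict.getD, PySem.Dict.get?]
  | cons kv t ih =>
    obtain ⟨k, v⟩ := kv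
    rw [List.map_cons, List.nodup_cons] at hnd
    obtain ⟨hkt, ht⟩ := hnd
    have h0 : (PySem.Dict.mk t).get? k = none :=
      (PySem.Dict.get?_eq_none_iff_not_mem_keys _ _).mpr
        (by simpa [PySem.Dict.keys] using hkt)
    have hgetk : (PySem.Dict.mk t).getD k false = false := by
      simp [PySem.Dict.getD_eq_get?_getD, h0]
    have hcong : rules.countP (fun r => (PySem.Dict.mk ((k, v) :: t)).getD r false)
        = rules.countP (fun r => if k == r then v else (PySem.Dict.mk t).getD r false) := by
      apply List.countP_congr
      intro r _
      rw [PySem.Dict.getD_eq_get?_getD, PySem.Dict.get?_mk_cons]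
      by_cases h : k == r
      · simp [h]
      · simp [h, PySem.Dict.getD_eq_get?_getD]
    rw [hcong, pv_countP_update k v _ hgetk rules hr, ih ht, List.countP_cons]

-- ===== VERDICT (by name: the statement is the Claim_ definition above) =====
theorem count_violations_py_spec : Claim_equal_count_violations_py := by
  intro vs _ hpre
  unfold Spec_count_violations_py count_violations_py count_violations_py_alt
  have hofC : PySem.Set.ofList
      ["critical_veh_ped_distance", "critical_veh_veh_distance", "very_high_speed",
       "high_closing_speed", "low_ttc"] = pvCritL := by decide
  have hofW : PySem.Set.ofList
      ["warning_veh_ped_distance", "warning_veh_veh_distance", "high_speed",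
       "mixed_traffic_close", "warning_ttc", "moderate_closing_speed"] = pvWarnL := by decide
  simp only [hofC, hofW]
  rw [show (["critical_veh_ped_distance", "critical_veh_veh_distance", "very_high_speed",
     "high_closing_speed", "low_ttc"] : List String) = pvCritL from rfl,
     show (["warning_veh_ped_distance", "warning_veh_veh_distance", "high_speed",
     "mixed_traffic_close", "warning_ttc", "moderate_closing_speed"] : List String) = pvWarnL from rfl,
     pv_foldlA, pv_foldlA, pv_foldlB,
     pv_main pvCritL (by decide) vs hpre, pv_main pvWarnL (by decide) vs hpre]
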